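-- pv_equiv track=rewrite | github.com/JennyMarip/port_scanner-HIT- | scanner.py | is_valid_ip_input
-- ===== SOURCE A (Python) =====
-- def is_valid_ip(s):
--     lists = s.split('.')
--     if len(lists) != 4:
--         return 'no'
--     for i in range(4):
--         if not lists[i].isdigit():
--             return 'no'
--         if int(lists[i]) not in range(0, 256):
--             return 'no'
--     return 'yes'
--
-- def is_valid_ip_input(ip1, ip2):
--     if is_valid_ip(ip1) == 'no' or is_valid_ip(ip2) == 'no':
--         return False
--     list1 = ip1.split('.')
--     list2 = ip2.split('.')
--     for i in range(4):
--         if int(list2[i]) > int(list1[i]):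
--             break
--         elif int(list2[i]) == int(list1[i]):
--             continue
--         else:
--             return False
--     return True
-- ===== SOURCE B (Python) =====
-- def _octets(ip):
--     parts = ip.split('.')
--     if len(parts) != 4:
--         return None
--     vals = []
--     for p in parts:
--         if not p.isdigit():
--             return None
--         v = int(p)
--         if not 0 <= v <= 255:
--             return None
--         vals.append(v)
--     return vals
--
-- def is_valid_ip_input(ip1, ip2):
--     o1 = _octets(ip1)
--     o2 = _octets(ip2)
--     if o1 is None or o2 is None:
--         return False
--     val1 = ((o1[0] * 256 + o1[1]) * 256 + o1[2]) * 256 + o1[3]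
--     val2 = ((o2[0] * 256 + o2[1]) * 256 + o2[2]) * 256 + o2[3]
--     return val2 >= val1
-- ===== Notes on version B (the rewrite author's own statement) =====
-- stated objective: idiomatic
-- what changed: Replaces the two string-level passes (a 'yes'/'no' validator plus a left-to-right octet comparison loop with break/continue) by one parse step per IP producing a single 32-bit integer value, compared with one scalar >=.
import Mathlib
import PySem

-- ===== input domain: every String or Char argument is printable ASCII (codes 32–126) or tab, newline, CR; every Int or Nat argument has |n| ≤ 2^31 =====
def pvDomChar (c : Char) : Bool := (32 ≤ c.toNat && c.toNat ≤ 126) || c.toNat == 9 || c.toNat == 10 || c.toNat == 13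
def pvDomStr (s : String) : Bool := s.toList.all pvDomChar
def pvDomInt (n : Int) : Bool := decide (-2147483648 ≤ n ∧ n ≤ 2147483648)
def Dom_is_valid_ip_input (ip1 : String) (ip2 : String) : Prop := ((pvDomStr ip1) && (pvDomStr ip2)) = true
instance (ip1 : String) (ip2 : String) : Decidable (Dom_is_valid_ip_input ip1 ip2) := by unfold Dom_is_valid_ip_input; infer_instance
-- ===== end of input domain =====

-- B parses each IP once into a single integer value and compares scalars, replacing A's
-- 'yes'/'no' validator plus octet-by-octet break/continue comparison loop (idiomatic rewrite).


-- ===== PORT A =====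
-- s.split('.'): the separator is non-empty, so split? is always some; getD [] never defaults.
def pvSplit (s : String) : List String := (PySem.Str.split? s ".").getD []

-- int(p): after isdigit has passed, Python's int cannot raise on an ASCII digit string,
-- so ofStr? is some there; getD 0 is never the default on reachable inputs.
def pvInt (p : String) : Int := (PySem.Int.ofStr? p).getD 0

-- the 'for i in range(4)' validation loop of is_valid_ip, with its early 'return "no"'s
def pvLoopA (lists : List String) : List Int → String
  | [] => "yes"
  | i :: rest =>
    let p := (PySem.List.pyGet? lists i).getD ""
    if ¬ (PySem.Str.strIsdigit p = true) then "no"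
    else if ¬ (0 ≤ pvInt p ∧ pvInt p < 256) then "no"
    else pvLoopA lists rest

def is_valid_ip (s : String) : String :=
  let lists := pvSplit s
  if lists.length ≠ 4 then "no"
  else pvLoopA lists (PySem.List.pyRange 0 4 1)

-- the comparison loop of is_valid_ip_input: break → True, continue, else return False
def pvLoopCmp (list1 list2 : List String) : List Int → Bool
  | [] => true
  | i :: rest =>
    let a := pvInt ((PySem.List.pyGet? list1 i).getD "")
    let b := pvInt ((PySem.List.pyGet? list2 i).getD "")
    if b > a then true
    else if b = a then pvLoopCmp list1 list2 rest
    else false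

def is_valid_ip_input (ip1 : String) (ip2 : String) : Bool :=
  if is_valid_ip ip1 = "no" ∨ is_valid_ip ip2 = "no" then false
  else
    let list1 := pvSplit ip1
    let list2 := pvSplit ip2
    pvLoopCmp list1 list2 (PySem.List.pyRange 0 4 1)

-- ===== PORT B =====
-- the 'for p in parts' loop of _octets, building vals front-to-back
def pvOctGo : List String → Option (List Int)
  | [] => some []
  | p :: rest =>
    if ¬ (PySem.Str.strIsdigit p = true) then none
    else
      let v := (PySem.Int.ofStr? p).getD 0
      if ¬ (0 ≤ v ∧ v ≤ 255) then none
      else (pvOctGo rest).map (v :: ·)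

def pvOctets (ip : String) : Option (List Int) :=
  let parts := pvSplit ip
  if parts.length ≠ 4 then none
  else pvOctGo parts

def is_valid_ip_input_alt (ip1 : String) (ip2 : String) : Bool :=
  match pvOctets ip1, pvOctets ip2 with
  | some o1, some o2 =>
    let val1 := ((o1.getD 0 0 * 256 + o1.getD 1 0) * 256 + o1.getD 2 0) * 256 + o1.getD 3 0
    let val2 := ((o2.getD 0 0 * 256 + o2.getD 1 0) * 256 + o2.getD 2 0) * 256 + o2.getD 3 0
    decide (val2 ≥ val1)
  | _, _ => false

-- ===== PRECONDITION & SPEC =====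
def Spec_is_valid_ip_input (ip1 : String) (ip2 : String) (out : Bool) : Prop := out = is_valid_ip_input_alt ip1 ip2
instance (ip1 : String) (ip2 : String) (out : Bool) : Decidable (Spec_is_valid_ip_input ip1 ip2 out) := by unfold Spec_is_valid_ip_input; infer_instance

-- ===== CLAIM (what is proved, stated in full; the proofs are below) =====
def Claim_equal_is_valid_ip_input : Prop := ∀ (ip1 : String) (ip2 : String), Dom_is_valid_ip_input ip1 ip2 → Spec_is_valid_ip_input ip1 ip2 (is_valid_ip_input ip1 ip2)

-- ===== LEMMAS AND PROOFS =====

-- a length-4 split is a literal four-element list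
theorem pv_len4 {l : List String} (h : l.length = 4) :
    ∃ a b c d, l = [a, b, c, d] := by
  match l, h with
  | [a, b, c, d], _ => exact ⟨a, b, c, d, rfl⟩

-- on a literal four-part list, A's loop and B's loop agree branch for branch
theorem pv_parts (p0 p1 p2 p3 : String) :
    (pvLoopA [p0, p1, p2, p3] (PySem.List.pyRange 0 4 1) = "no" ∧
      pvOctGo [p0, p1, p2, p3] = none) ∨
    (pvLoopA [p0, p1, p2, p3] (PySem.List.pyRange 0 4 1) = "yes" ∧
      pvOctGo [p0, p1, p2, p3] = some [pvInt p0, pvInt p1, pvInt p2, pvInt p3] ∧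
      ((0 ≤ pvInt p0 ∧ pvInt p0 < 256) ∧ (0 ≤ pvInt p1 ∧ pvInt p1 < 256) ∧
       (0 ≤ pvInt p2 ∧ pvInt p2 < 256) ∧ (0 ≤ pvInt p3 ∧ pvInt p3 < 256))) := by
  have e0 : (PySem.List.pyGet? [p0, p1, p2, p3] 0).getD "" = p0 := rfl
  have e1 : (PySem.List.pyGet? [p0, p1, p2, p3] 1).getD "" = p1 := rfl
  have e2 : (PySem.List.pyGet? [p0, p1, p2, p3] 2).getD "" = p2 := rfl
  have e3 : (PySem.List.pyGet? [p0, p1, p2, p3] 3).getD "" = p3 := rfl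
  simp only [show PySem.List.pyRange 0 4 1 = [0, 1, 2, 3] from rfl,
    pvLoopA, pvOctGo, pvInt, e0, e1, e2, e3]
  split_ifs <;>
    first
      | (left; exact ⟨rfl, rfl⟩)
      | (right; exact ⟨rfl, rfl, by omega, by omega, by omega, by omega⟩)
      | omega

-- A's validator and B's parser agree: "no" exactly when none; in the valid case B's octets
-- are the pvInt values of the four parts, each in [0, 255].
theorem pv_valid_iff (s : String) :
    (is_valid_ip s = "no" ∧ pvOctets s = none) ∨
    (∃ p0 p1 p2 p3, pvSplit s = [p0, p1, p2, p3] ∧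
      is_valid_ip s = "yes" ∧
      pvOctets s = some [pvInt p0, pvInt p1, pvInt p2, pvInt p3] ∧
      (0 ≤ pvInt p0 ∧ pvInt p0 < 256) ∧ (0 ≤ pvInt p1 ∧ pvInt p1 < 256) ∧
      (0 ≤ pvInt p2 ∧ pvInt p2 < 256) ∧ (0 ≤ pvInt p3 ∧ pvInt p3 < 256)) := by
  by_cases hlen : (pvSplit s).length = 4
  · obtain ⟨p0, p1, p2, p3, hl⟩ := pv_len4 hlen
    have hA : is_valid_ip s = pvLoopA [p0, p1, p2, p3] (PySem.List.pyRange 0 4 1) := by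
      simp [is_valid_ip, hl]
    have hB : pvOctets s = pvOctGo [p0, p1, p2, p3] := by
      simp [pvOctets, hl]
    rw [hA, hB]
    rcases pv_parts p0 p1 p2 p3 with ⟨h1, h2⟩ | ⟨h1, h2, h3⟩
    · exact Or.inl ⟨h1, h2⟩
    · exact Or.inr ⟨p0, p1, p2, p3, hl, h1, h2, h3⟩
  · left
    constructor
    · simp [is_valid_ip, hlen]
    · simp [pvOctets, hlen]

-- the comparison loop on four in-range octets is integer comparison of the base-256 values
theorem pv_cmp (p0 p1 p2 p3 q0 q1 q2 q3 : String)
    (_h0 : 0 ≤ pvInt p0 ∧ pvInt p0 < 256) (h1 : 0 ≤ pvInt p1 ∧ pvInt p1 < 256)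
    (h2 : 0 ≤ pvInt p2 ∧ pvInt p2 < 256) (h3 : 0 ≤ pvInt p3 ∧ pvInt p3 < 256)
    (_g0 : 0 ≤ pvInt q0 ∧ pvInt q0 < 256) (g1 : 0 ≤ pvInt q1 ∧ pvInt q1 < 256)
    (g2 : 0 ≤ pvInt q2 ∧ pvInt q2 < 256) (g3 : 0 ≤ pvInt q3 ∧ pvInt q3 < 256) :
    pvLoopCmp [p0, p1, p2, p3] [q0, q1, q2, q3] (PySem.List.pyRange 0 4 1) =
      decide (((pvInt q0 * 256 + pvInt q1) * 256 + pvInt q2) * 256 + pvInt q3 ≥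
              ((pvInt p0 * 256 + pvInt p1) * 256 + pvInt p2) * 256 + pvInt p3) := by
  simp only [show PySem.List.pyRange 0 4 1 = [0, 1, 2, 3] from rfl]
  set a0 := pvInt p0; set a1 := pvInt p1; set a2 := pvInt p2; set a3 := pvInt p3
  set e0 := pvInt q0; set e1 := pvInt q1; set e2 := pvInt q2; set e3 := pvInt q3
  simp only [pvLoopCmp, PySem.List.pyGet?, PySem.List.pyIdx?]
  norm_num
  simp only [show (2:Int).toNat = 2 from rfl, show (3:Int).toNat = 3 from rfl,
    List.getElem_cons_succ, List.getElem_cons_zero]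
  rw [Bool.eq_iff_iff]
  simp only [Bool.or_eq_true, Bool.and_eq_true, decide_eq_true_eq]
  omega

-- ===== VERDICT (by name: the statement is the Claim_ definition above) =====
theorem is_valid_ip_input_spec : Claim_equal_is_valid_ip_input := by
  intro ip1 ip2 _
  unfold Spec_is_valid_ip_input is_valid_ip_input is_valid_ip_input_alt
  rcases pv_valid_iff ip1 with ⟨hA1, hB1⟩ | ⟨p0, p1, p2, p3, hs1, hA1, hB1, b0, b1, b2, b3⟩ <;>
    rcases pv_valid_iff ip2 with ⟨hA2, hB2⟩ | ⟨q0, q1, q2, q3, hs2, hA2, hB2, c0, c1, c2, c3⟩ <;>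
    simp [hA1, hA2, hB1, hB2]
  rw [hs1, hs2, pv_cmp p0 p1 p2 p3 q0 q1 q2 q3 b0 b1 b2 b3 c0 c1 c2 c3]
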